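-- pv_equiv track=rewrite | github.com/vigneshsabapathi/python-algorithms | dynamic_programming/bitmask_optimized.py | functools_cache
-- ===== SOURCE A (Python) =====
-- from collections import defaultdict
-- from functools import lru_cache
--
-- def functools_cache(task_performed: list[list[int]], total_tasks: int) -> int:
--     """
--     >>> functools_cache([[1, 3, 4], [1, 2, 5], [3, 4]], 5)
--     10
--     """
--     num_people = len(task_performed)
--     final_mask = (1 << num_people) - 1
--
--     # Build task -> person mapping
--     task_to_people: dict[int, list[int]] = defaultdict(list)
--     for person_idx, tasks in enumerate(task_performed):
--         for task in tasks:
--             task_to_people[task].append(person_idx)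
--
--     @lru_cache(maxsize=None)
--     def solve(mask: int, task_no: int) -> int:
--         if mask == final_mask:
--             return 1
--         if task_no > total_tasks:
--             return 0
--         # Skip this task
--         total = solve(mask, task_no + 1)
--         # Assign this task to each eligible person
--         for p in task_to_people.get(task_no, []):
--             if not (mask & (1 << p)):
--                 total += solve(mask | (1 << p), task_no + 1)
--         return total
--
--     return solve(0, 1)
-- ===== SOURCE B (Python) =====
-- def functools_cache(task_performed: list[list[int]], total_tasks: int) -> int:
--     num_people = len(task_performed)
--     final_mask = (1 << num_people) - 1
--
--     # Build task -> person mapping (same mapping as A)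
--     task_to_people: dict[int, list[int]] = {}
--     for person_idx, tasks in enumerate(task_performed):
--         for task in tasks:
--             task_to_people.setdefault(task, []).append(person_idx)
--
--     # Forward tabulation over the tasks that actually appear, in increasing
--     # order: dp maps a mask of already-used people to the number of ways to
--     # produce it; each task either goes unused or is given to a free eligible
--     # person.  Tasks absent from the mapping contribute nothing, so only the
--     # present tasks are visited.
--     dp = {0: 1}
--     for task in sorted(task_to_people):
--         if not (1 <= task <= total_tasks):
--             continue
--         people = task_to_people[task]
--         new_dp = dict(dp)
--         for mask, cnt in dp.items():
--             for p in people: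
--                 if not (mask & (1 << p)):
--                     key = mask | (1 << p)
--                     new_dp[key] = new_dp.get(key, 0) + cnt
--         dp = new_dp
--     return dp.get(final_mask, 0)
-- ===== Notes on version B (the rewrite author's own statement) =====
-- stated objective: alternative
-- what changed: Replaced A's lru_cache top-down recursion over (mask, task_no) states by an iterative forward DP: a dict mapping used-people masks to counts, updated once per occurring task (in sorted order), skipping the task numbers that appear in no one's list instead of recursing through all of 1..total_tasks.
-- outside the precondition, e.g. on functools_cache([[1]], 450): A returns 1, B returns 1; on functools_cache([[1]], 100000): A raises RecursionError, B returns 1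
-- crash fix: On nonempty task_performed with total_tasks >= 500 A raises RecursionError (stack depth grows linearly with total_tasks); B iterates only over the occurring tasks and returns the count. — e.g. on functools_cache([[1]], 100000): A raises RecursionError, B returns 1
import Mathlib
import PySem

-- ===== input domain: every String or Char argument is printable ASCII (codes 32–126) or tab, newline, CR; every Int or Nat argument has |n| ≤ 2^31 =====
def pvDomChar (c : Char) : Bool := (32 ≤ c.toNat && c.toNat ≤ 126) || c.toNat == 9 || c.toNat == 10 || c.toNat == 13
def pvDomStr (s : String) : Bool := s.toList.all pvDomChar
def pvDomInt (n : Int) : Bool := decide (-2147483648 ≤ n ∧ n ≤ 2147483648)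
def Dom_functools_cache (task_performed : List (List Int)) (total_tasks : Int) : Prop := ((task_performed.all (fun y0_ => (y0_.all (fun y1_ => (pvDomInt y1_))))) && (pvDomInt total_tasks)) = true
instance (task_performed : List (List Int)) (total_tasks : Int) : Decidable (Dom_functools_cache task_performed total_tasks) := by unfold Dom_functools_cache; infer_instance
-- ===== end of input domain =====

-- B replaces A's memoized top-down recursion over (mask, task_no) by a forward dict DP over
-- masks of used people, visiting only the tasks that actually occur, in sorted order
-- (objective: alternative; B also returns where A's deep recursion overflows the stack).

-- ===== PORT A =====
-- task -> person mapping: defaultdict(list) append loop (modify t [] (· ++ [person_idx]))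
def pvBuildMapA (task_performed : List (List Int)) : PySem.Dict Int (List Int) :=
  (PySem.List.enumerate task_performed).foldl
    (fun d pt => pt.2.foldl (fun d t => d.modify t [] (fun l => l ++ [pt.1])) d)
    PySem.Dict.empty

-- the inner @lru_cache recursion 'solve' of A, ported without the cache (value-identical);
-- '1 << p' is ported as '(1:Int) <<< (p.toNat : Int)' (p is a person index, always ≥ 0 in Python)
def pvSolveA (final_mask : Int) (ttp : PySem.Dict Int (List Int)) (total_tasks : Int)
    (mask task_no : Int) : Int :=
  if mask = final_mask then 1
  else if task_no > total_tasks then 0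
  else
    (ttp.getD task_no []).foldl
      (fun total p =>
        if PySem.Int.band mask ((1:Int) <<< (p.toNat : Int)) = 0 then
          total + pvSolveA final_mask ttp total_tasks
            (PySem.Int.bor mask ((1:Int) <<< (p.toNat : Int))) (task_no + 1)
        else total)
      (pvSolveA final_mask ttp total_tasks mask (task_no + 1))
termination_by (total_tasks + 1 - task_no).toNat
decreasing_by all_goals omega

def functools_cache (task_performed : List (List Int)) (total_tasks : Int) : Int :=
  let num_people : Int := task_performed.length
  let final_mask : Int := ((1:Int) <<< (num_people.toNat : Int)) - 1
  pvSolveA final_mask (pvBuildMapA task_performed) total_tasks 0 1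

-- ===== PORT B =====
-- B builds the same task -> person mapping (setdefault(...).append == modify t [] (· ++ [person_idx]))
def pvBuildMapB (task_performed : List (List Int)) : PySem.Dict Int (List Int) :=
  (PySem.List.enumerate task_performed).foldl
    (fun d pt => pt.2.foldl (fun d t => d.modify t [] (fun l => l ++ [pt.1])) d)
    PySem.Dict.empty

-- one task of Source B's forward DP: 'new_dp = dict(dp); for mask, cnt in dp.items(): …'
-- (the copy is the fold's start; 'new_dp[key] = new_dp.get(key, 0) + cnt' is modify key 0 (· + cnt))
def pvStepB (dp : PySem.Dict Int Int) (people : List Int) : PySem.Dict Int Int :=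
  dp.items.foldl
    (fun nd mc =>
      people.foldl
        (fun nd p =>
          if PySem.Int.band mc.1 ((1:Int) <<< (p.toNat : Int)) = 0 then
            nd.modify (PySem.Int.bor mc.1 ((1:Int) <<< (p.toNat : Int))) 0 (· + mc.2)
          else nd)
        nd)
    dp

-- 'for task in sorted(task_to_people)' iterates the keys in ascending order;
-- 'task_to_people[task]' is getD task [] (the key is always present there)
def functools_cache_alt (task_performed : List (List Int)) (total_tasks : Int) : Int :=
  let num_people : Int := task_performed.length
  let final_mask : Int := ((1:Int) <<< (num_people.toNat : Int)) - 1
  let ttp := pvBuildMapB task_performed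
  let dpF :=
    (PySem.List.sorted ttp.keys (fun k => k) false).foldl
      (fun dp task =>
        if 1 ≤ task ∧ task ≤ total_tasks then pvStepB dp (ttp.getD task []) else dp)
      (PySem.Dict.empty.insert 0 1)
  dpF.getD final_mask 0

-- ===== PRECONDITION & SPEC =====
-- Pre_ excludes nonempty task_performed with total_tasks > 400: A's recursion depth grows
-- linearly with total_tasks and overflows CPython's default stack (RecursionError, with the
-- lru_cache wrapper frames, slightly below total_tasks = 500); 400 leaves a safety margin.
def Pre_functools_cache (task_performed : List (List Int)) (total_tasks : Int) : Prop :=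
  task_performed = [] ∨ total_tasks ≤ 400
instance (task_performed : List (List Int)) (total_tasks : Int) : Decidable (Pre_functools_cache task_performed total_tasks) := by unfold Pre_functools_cache; infer_instance
def pvWitness_functools_cache : List (List Int) × Int := ([[1, 3, 4], [1, 2, 5], [3, 4]], 5)

-- On nonempty task_performed with total_tasks ≥ 500 A raises RecursionError (stack depth
-- grows linearly with total_tasks); B is iterative over the occurring tasks only and returns the count.
def Raises_functools_cache (task_performed : List (List Int)) (total_tasks : Int) : Prop :=
  task_performed ≠ [] ∧ 500 ≤ total_tasks
instance (task_performed : List (List Int)) (total_tasks : Int) : Decidable (Raises_functools_cache task_performed total_tasks) := by unfold Raises_functools_cache; infer_instance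
def pvRaiseWitness_functools_cache : List (List Int) × Int := ([[1]], 100000)
def pvRaiseWitnessOut_functools_cache : Int := 1

def Spec_functools_cache (task_performed : List (List Int)) (total_tasks : Int) (out : Int) : Prop := out = functools_cache_alt task_performed total_tasks
instance (task_performed : List (List Int)) (total_tasks : Int) (out : Int) : Decidable (Spec_functools_cache task_performed total_tasks out) := by unfold Spec_functools_cache; infer_instance

-- ===== CLAIM (what is proved, stated in full; the proofs are below) =====
def Claim_equal_functools_cache : Prop := ∀ (task_performed : List (List Int)) (total_tasks : Int), Dom_functools_cache task_performed total_tasks → Pre_functools_cache task_performed total_tasks → Spec_functools_cache task_performed total_tasks (functools_cache task_performed total_tasks)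
def Claim_raises_functools_cache : Prop := (∀ (task_performed : List (List Int)) (total_tasks : Int), Dom_functools_cache task_performed total_tasks → Raises_functools_cache task_performed total_tasks → ¬ Pre_functools_cache task_performed total_tasks) ∧ (Dom_functools_cache (pvRaiseWitness_functools_cache.1) (pvRaiseWitness_functools_cache.2) ∧ Raises_functools_cache (pvRaiseWitness_functools_cache.1) (pvRaiseWitness_functools_cache.2) ∧ functools_cache_alt (pvRaiseWitness_functools_cache.1) (pvRaiseWitness_functools_cache.2) = pvRaiseWitnessOut_functools_cache)

-- ===== LEMMAS AND PROOFS =====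

-- 1 << p as a proof-side abbreviation
def pvBit (p : Int) : Int := (1:Int) <<< (p.toNat : Int)

-- backward count: pvW fm L m = number of ways to complete mask m using the people-lists in L
def pvW (fm : Int) : List (List Int) → Int → Int
  | [], m => if m = fm then 1 else 0
  | ps :: L, m =>
      pvW fm L m +
        (ps.map (fun p =>
          if PySem.Int.band m (pvBit p) = 0 then pvW fm L (PySem.Int.bor m (pvBit p)) else 0)).sum

-- weighted sum of a dict's items against a mask-valuation g
def pvS (l : List (Int × Int)) (g : Int → Int) : Int :=
  (l.map (fun mc => mc.2 * g mc.1)).sum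

-- a guarded accumulating fold is its base plus a sum of guarded terms
theorem pvFoldlIf (c : Int → Prop) [DecidablePred c] (h : Int → Int) :
    ∀ (ps : List Int) (t : Int),
      ps.foldl (fun tot p => if c p then tot + h p else tot) t
        = t + (ps.map (fun p => if c p then h p else 0)).sum := by
  intro ps
  induction ps with
  | nil => intro t; simp
  | cons p ps ih =>
    intro t
    by_cases hc : c p
    · simp only [List.foldl_cons, List.map_cons, List.sum_cons, if_pos hc, ih]
      ring
    · simp only [List.foldl_cons, List.map_cons, List.sum_cons, if_neg hc, ih]
      ring

theorem pvS_add (l : List (Int × Int)) (g h : Int → Int) :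
    pvS l (fun m => g m + h m) = pvS l g + pvS l h := by
  unfold pvS
  rw [← PySem.List.sum_map_add_int]
  exact congrArg List.sum (List.map_congr_left (fun mc _ => by ring))

-- a person bit below n is set in the full mask 2^n - 1
theorem pvBand_full (n : Nat) (p : Int) (hp0 : 0 ≤ p) (hp1 : p < (n : Int)) :
    PySem.Int.band ((2 ^ n - 1 : Nat) : Int) (pvBit p) ≠ 0 := by
  have hbit : pvBit p = ((2 ^ p.toNat : Nat) : Int) := by
    rw [pvBit]
    exact Int.one_shiftLeft p.toNat
  rw [hbit, PySem.Int.band_natCast]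
  have hp : p.toNat < n := by omega
  have : (2 ^ n - 1) &&& 2 ^ p.toNat ≠ 0 := by
    intro hz
    have ht : ((2 ^ n - 1) &&& 2 ^ p.toNat).testBit p.toNat = false := by rw [hz]; simp
    simp [Nat.testBit_and, Nat.testBit_two_pow_sub_one, hp, Nat.testBit_two_pow_self] at ht
  intro hz
  apply this
  exact_mod_cast hz

-- a full mask stays full: every eligible person's bit is already set
theorem pvWfull (n : Nat) (fm : Int) (hfm : fm = ((2 ^ n - 1 : Nat) : Int)) :
    ∀ L : List (List Int), (∀ ps ∈ L, ∀ p ∈ ps, 0 ≤ p ∧ p < (n : Int)) →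
      pvW fm L fm = 1 := by
  intro L
  induction L with
  | nil => intro _; simp [pvW]
  | cons ps L ih =>
    intro hb
    rw [pvW]
    rw [ih (fun ps' h' => hb ps' (List.mem_cons_of_mem _ h'))]
    have hz : ∀ p ∈ ps, (if PySem.Int.band fm (pvBit p) = 0 then pvW fm L (PySem.Int.bor fm (pvBit p)) else 0) = 0 := by
      intro p hp
      obtain ⟨h0, h1⟩ := hb ps (List.mem_cons_self) p hp
      rw [if_neg (hfm ▸ pvBand_full n p h0 h1)]
    rw [List.map_congr_left hz]
    simp

theorem pvNodup_modify {ν : Type} (d : PySem.Dict Int ν) (k : Int) (d0 : ν) (f : ν → ν)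
    (h : d.keys.Nodup) : (d.modify k d0 f).keys.Nodup := by
  unfold PySem.Dict.modify
  by_cases hc : d.contains k = true
  · rw [PySem.Dict.keys_insert_of_contains d _ hc]; exact h
  · rw [PySem.Dict.keys_insert_of_not_contains d _ (by simpa using hc)]
    have hk : k ∉ d.keys := by
      intro hm; exact hc ((PySem.Dict.contains_iff_mem_keys d k).mpr hm)
    simp [List.nodup_append, h]
    exact fun a ha hak => hk (hak ▸ ha)

theorem pvS_zero (l : List (Int × Int)) (fm : Int) (h : ∀ mc ∈ l, mc.1 ≠ fm) :
    pvS l (fun m => if m = fm then 1 else 0) = 0 := by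
  unfold pvS
  apply List.sum_eq_zero
  intro x hx
  simp only [List.mem_map] at hx
  obtain ⟨mc, hm, rfl⟩ := hx
  simp [h mc hm]

theorem pvS_indicator (d : PySem.Dict Int Int) (fm : Int) (h : d.keys.Nodup) :
    pvS d.items (fun m => if m = fm then 1 else 0) = d.getD fm 0 := by
  obtain ⟨l⟩ := d
  induction l with
  | nil => simp [pvS, PySem.Dict.getD, PySem.Dict.get?]
  | cons ab t ih =>
    obtain ⟨a, b⟩ := ab
    simp only [PySem.Dict.keys] at h ih
    simp only [List.map_cons, List.nodup_cons, List.mem_map] at h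
    rw [PySem.Dict.getD_eq_get?_getD, PySem.Dict.get?_mk_cons]
    by_cases ha : a = fm
    · subst ha
      simp only [beq_self_eq_true, if_true]
      have hz : pvS t (fun m => if m = a then 1 else 0) = 0 := by
        apply pvS_zero
        intro mc hm hfm
        exact h.1 ⟨mc, hm, hfm⟩
      simp [pvS] at hz ⊢
      simp [hz]
    · have : (a == fm) = false := by simp [ha]
      rw [this]
      simp only [Bool.false_eq_true, if_false]
      rw [← PySem.Dict.getD_eq_get?_getD]
      rw [← ih h.2]
      simp [pvS, ha]

theorem pvS_modify (d : PySem.Dict Int Int) (k c : Int) (g : Int → Int)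
    (h : d.keys.Nodup) :
    pvS (d.modify k 0 (· + c)).items g = pvS d.items g + c * g k := by
  unfold PySem.Dict.modify
  by_cases hc : d.contains k = true
  · have hmem : ∃ p ∈ d.items, (p.1 == k) = true := by
      unfold PySem.Dict.contains at hc
      simpa using hc
    obtain ⟨⟨k', v0⟩, hm, hk'⟩ := hmem
    have hk'' : k' = k := by simpa using hk'
    subst hk''
    obtain ⟨l1, l2, hl⟩ := List.append_of_mem hm
    have hnd : (l1.map Prod.fst ++ k' :: l2.map Prod.fst).Nodup := by
      have := h
      simp only [PySem.Dict.keys, hl, List.map_append, List.map_cons] at this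
      exact this
    have hk1 : k' ∉ l1.map Prod.fst := by
      intro hx
      exact (List.nodup_append.mp hnd).2.2 k' hx k' (by simp [List.mem_cons]) rfl
    have hk2 : k' ∉ l2.map Prod.fst := (List.nodup_cons.mp (List.nodup_append.mp hnd).2.1).1
    have hget : d.getD k' 0 = v0 := by
      rw [PySem.Dict.getD_eq_get?_getD, PySem.Dict.get?_of_mem_items d hm h]
      rfl
    rw [PySem.Dict.items_insert_of_contains d _ hc, hget, hl]
    have e1 : ∀ p ∈ l1, (if (p.1 == k') = true then (k', v0 + c) else p) = p := by
      intro p hp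
      have : (p.1 == k') = false := by
        simp only [beq_eq_false_iff_ne, ne_eq]
        intro hpk
        exact hk1 (hpk ▸ List.mem_map_of_mem hp)
      simp [this]
    have e2 : ∀ p ∈ l2, (if (p.1 == k') = true then (k', v0 + c) else p) = p := by
      intro p hp
      have : (p.1 == k') = false := by
        simp only [beq_eq_false_iff_ne, ne_eq]
        intro hpk
        exact hk2 (hpk ▸ List.mem_map_of_mem hp)
      simp [this]
    simp only [pvS, List.map_append, List.map_cons, List.sum_append, List.sum_cons,
      beq_self_eq_true, if_true, List.map_congr_left e1, List.map_congr_left e2, List.map_id']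
    ring
  · rw [PySem.Dict.items_insert_of_not_contains d _ (by simpa using hc)]
    rw [PySem.Dict.getD_of_not_contains d 0 (by simpa using hc)]
    simp only [pvS, List.map_append, List.sum_append, List.map_cons, List.sum_cons,
      List.map_nil, List.sum_nil]
    ring

-- A's recursion computes the backward count over the task list k..total_tasks
theorem pvSolveA_eq (n : Nat) (fm : Int) (hfm : fm = ((2 ^ n - 1 : Nat) : Int))
    (ttp : PySem.Dict Int (List Int)) (T : Int)
    (hb : ∀ k p, p ∈ ttp.getD k [] → 0 ≤ p ∧ p < (n : Int)) :
    ∀ (j : Nat) (k m : Int), (T + 1 - k).toNat ≤ j →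
      pvSolveA fm ttp T m k
        = pvW fm ((PySem.List.pyRange k (T+1) 1).map (fun t => ttp.getD t [])) m := by
  intro j
  induction j with
  | zero =>
    intro k m hk
    have hkT : T < k := by omega
    rw [PySem.List.pyRange_one_eq_nil (by omega)]
    rw [pvSolveA]
    by_cases hm : m = fm
    · simp [pvW, hm]
    · simp [pvW, hm, hkT]
  | succ j ih =>
    intro k m hk
    by_cases hkT : T < k
    · rw [PySem.List.pyRange_one_eq_nil (by omega)]
      rw [pvSolveA]
      by_cases hm : m = fm
      · simp [pvW, hm]
      · simp [pvW, hm, hkT]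
    · rw [PySem.List.pyRange_one_cons (by omega), List.map_cons]
      by_cases hm : m = fm
      · rw [pvSolveA, if_pos hm, hm]
        rw [pvWfull n fm hfm]
        intro ps hps p hp
        simp only [List.mem_cons, List.mem_map] at hps
        rcases hps with h1 | ⟨t, _, h2⟩
        · exact hb k p (h1 ▸ hp)
        · exact hb t p (h2 ▸ hp)
      · rw [pvSolveA, if_neg hm, if_neg (by omega)]
        rw [pvFoldlIf (fun p => PySem.Int.band m ((1:Int) <<< (p.toNat : Int)) = 0)
          (fun p => pvSolveA fm ttp T (PySem.Int.bor m ((1:Int) <<< (p.toNat : Int))) (k + 1))]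
        rw [pvW]
        have hih : ∀ m', pvSolveA fm ttp T m' (k + 1)
            = pvW fm ((PySem.List.pyRange (k+1) (T+1) 1).map (fun t => ttp.getD t [])) m' :=
          fun m' => ih (k+1) m' (by omega)
        rw [hih m]
        congr 1
        apply congrArg
        apply List.map_congr_left
        intro p _
        rw [hih]
        rfl

-- dropping tasks with no eligible people does not change the count
theorem pvW_filter (fm : Int) (G : Int → List Int) (q : Int → Bool)
    (hq : ∀ t, q t = false → G t = []) :
    ∀ (ts : List Int) (m : Int),
      pvW fm (ts.map G) m = pvW fm ((ts.filter q).map G) m := by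
  intro ts
  induction ts with
  | nil => intro m; rfl
  | cons t ts ih =>
    intro m
    by_cases hqt : q t
    · simp only [List.filter_cons, hqt, if_true, List.map_cons, pvW]
      rw [ih m]
      congr 1
      apply congrArg
      apply List.map_congr_left
      intro p _
      rw [ih]
    · simp only [List.filter_cons, hqt, List.map_cons, pvW, hq t (by simpa using hqt)]
      simpa using ih m

-- the inner person-loop of one B step: adds c * (guarded sum of g) and keeps keys unique
theorem pvInner (m c : Int) (g : Int → Int) :
    ∀ (ps : List Int) (nd : PySem.Dict Int Int), nd.keys.Nodup →
      pvS ((ps.foldl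
            (fun nd p =>
              if PySem.Int.band m ((1:Int) <<< (p.toNat : Int)) = 0 then
                nd.modify (PySem.Int.bor m ((1:Int) <<< (p.toNat : Int))) 0 (· + c)
              else nd) nd).items) g
          = pvS nd.items g +
            c * (ps.map (fun p =>
                  if PySem.Int.band m (pvBit p) = 0 then g (PySem.Int.bor m (pvBit p)) else 0)).sum
        ∧ (ps.foldl
            (fun nd p =>
              if PySem.Int.band m ((1:Int) <<< (p.toNat : Int)) = 0 then
                nd.modify (PySem.Int.bor m ((1:Int) <<< (p.toNat : Int))) 0 (· + c)
              else nd) nd).keys.Nodup := by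
  intro ps
  induction ps with
  | nil => intro nd hn; simpa using hn
  | cons p ps ih =>
    intro nd hn
    simp only [List.foldl_cons, List.map_cons, List.sum_cons]
    by_cases hc : PySem.Int.band m ((1:Int) <<< (p.toNat : Int)) = 0
    · rw [if_pos hc]
      obtain ⟨h1, h2⟩ := ih _ (pvNodup_modify nd _ 0 _ hn)
      refine ⟨?_, h2⟩
      rw [h1, pvS_modify nd _ c g hn]
      simp only [pvBit]
      rw [if_pos hc]
      ring
    · rw [if_neg hc]
      have hhc : ¬ PySem.Int.band m (pvBit p) = 0 := hc
      obtain ⟨h1, h2⟩ := ih nd hn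
      refine ⟨?_, h2⟩
      rw [h1]
      simp only [pvBit] at hhc ⊢
      rw [if_neg hhc]
      ring

-- one B step turns the valuation pvW fm L into pvW fm (ps :: L)
theorem pvStepB_S (fm : Int) (L : List (List Int)) (ps : List Int) :
    ∀ (dp : PySem.Dict Int Int), dp.keys.Nodup →
      pvS (pvStepB dp ps).items (pvW fm L) = pvS dp.items (pvW fm (ps :: L))
        ∧ (pvStepB dp ps).keys.Nodup := by
  intro dp hn
  have main : ∀ (l : List (Int × Int)) (nd : PySem.Dict Int Int), nd.keys.Nodup →
      pvS ((l.foldl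
            (fun nd mc =>
              ps.foldl
                (fun nd p =>
                  if PySem.Int.band mc.1 ((1:Int) <<< (p.toNat : Int)) = 0 then
                    nd.modify (PySem.Int.bor mc.1 ((1:Int) <<< (p.toNat : Int))) 0 (· + mc.2)
                  else nd)
                nd) nd).items) (pvW fm L)
          = pvS nd.items (pvW fm L) +
            pvS l (fun m => (ps.map (fun p =>
              if PySem.Int.band m (pvBit p) = 0 then pvW fm L (PySem.Int.bor m (pvBit p)) else 0)).sum)
        ∧ (l.foldl
            (fun nd mc =>
              ps.foldl
                (fun nd p =>
                  if PySem.Int.band mc.1 ((1:Int) <<< (p.toNat : Int)) = 0 then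
                    nd.modify (PySem.Int.bor mc.1 ((1:Int) <<< (p.toNat : Int))) 0 (· + mc.2)
                  else nd)
                nd) nd).keys.Nodup := by
    intro l
    induction l with
    | nil => intro nd hn; simp [pvS, hn]
    | cons mc l ihl =>
      intro nd hn
      simp only [List.foldl_cons]
      obtain ⟨h1, h2⟩ := pvInner mc.1 mc.2 (pvW fm L) ps nd hn
      obtain ⟨h3, h4⟩ := ihl _ h2
      refine ⟨?_, h4⟩
      rw [h3, h1]
      simp only [pvS, List.map_cons, List.sum_cons]
      ring
  obtain ⟨h1, h2⟩ := main dp.items dp hn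
  refine ⟨?_, h2⟩
  rw [pvStepB] at *
  rw [h1]
  have : pvS dp.items (pvW fm (ps :: L))
      = pvS dp.items (fun m => pvW fm L m + (ps.map (fun p =>
          if PySem.Int.band m (pvBit p) = 0 then pvW fm L (PySem.Int.bor m (pvBit p)) else 0)).sum) := rfl
  rw [this, pvS_add]

-- B's whole task loop, as an invariant of the weighted sum
theorem pvLoopB (fm : Int) (G : Int → List Int) :
    ∀ (ts : List Int) (dp : PySem.Dict Int Int), dp.keys.Nodup →
      pvS ((ts.foldl (fun dp t => pvStepB dp (G t)) dp).items) (pvW fm [])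
          = pvS dp.items (pvW fm (ts.map G))
        ∧ (ts.foldl (fun dp t => pvStepB dp (G t)) dp).keys.Nodup := by
  intro ts
  induction ts with
  | nil => intro dp hn; exact ⟨rfl, hn⟩
  | cons t ts ih =>
    intro dp hn
    simp only [List.foldl_cons, List.map_cons]
    obtain ⟨h1, h2⟩ := pvStepB_S fm (ts.map G) (G t) dp hn
    obtain ⟨h3, h4⟩ := ih (pvStepB dp (G t)) h2
    exact ⟨by rw [h3, h1], h4⟩

-- a fold guarded by a decidable proposition is a fold over the filtered list
theorem pvFoldlGuard {β : Type} (P : Int → Prop) [DecidablePred P]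
    (f : β → Int → β) (ts : List Int) (dp : β) :
    ts.foldl (fun dp t => if P t then f dp t else dp) dp
      = (ts.filter (fun t => decide (P t))).foldl f dp := by
  rw [List.foldl_filter]
  simp only [decide_eq_true_eq]

-- the nested build loop, flattened to a single fold over (task, person) pairs
theorem pvBuild_flat (L : List (Int × List Int)) (d : PySem.Dict Int (List Int)) :
    L.foldl (fun d pt => pt.2.foldl (fun d t => d.modify t [] (fun l => l ++ [pt.1])) d) d
      = (L.flatMap (fun pt => pt.2.map (fun t => (t, pt.1)))).foldl
          (fun d q => d.modify q.1 [] (fun l => l ++ [q.2])) d := by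
  induction L generalizing d with
  | nil => rfl
  | cons pt L ih =>
    simp only [List.foldl_cons, List.flatMap_cons, List.foldl_append, ih, List.foldl_map]

-- every person index stored in the mapping is a valid index into task_performed
theorem pvBuild_mem_bound (tp : List (List Int)) (k p : Int)
    (hp : p ∈ (pvBuildMapA tp).getD k []) : 0 ≤ p ∧ p < (tp.length : Int) := by
  unfold pvBuildMapA at hp
  rw [pvBuild_flat] at hp
  rw [PySem.Dict.getD_foldl_modify_append] at hp
  simp only [PySem.Dict.getD_empty, List.nil_append, List.mem_map, List.mem_filter,
    List.mem_flatMap, PySem.List.mem_enumerate_iff] at hp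
  obtain ⟨q, ⟨⟨pt, ⟨⟨i, hi, hpt⟩, hq⟩⟩, -⟩, hq2⟩ := hp
  subst hpt
  obtain ⟨t, -, ht⟩ := hq
  subst ht
  simp at hq2
  omega

-- the mapping's keys are unique (every insertion goes through modify)
theorem pvBuild_nodup (tp : List (List Int)) : (pvBuildMapA tp).keys.Nodup := by
  unfold pvBuildMapA
  have main : ∀ (L : List (Int × List Int)) (d : PySem.Dict Int (List Int)), d.keys.Nodup →
      (L.foldl (fun d pt => pt.2.foldl (fun d t => d.modify t [] (fun l => l ++ [pt.1])) d) d).keys.Nodup := by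
    intro L
    induction L with
    | nil => intro d hd; exact hd
    | cons pt L ih =>
      intro d hd
      simp only [List.foldl_cons]
      exact ih _ (PySem.Dict.nodup_keys_foldl_modify_key pt.2 (fun t => t) []
        (fun _ _ => (fun l => l ++ [pt.1])) d hd)
  exact main _ _ (by simp)

-- the two ports build the identical mapping (defaultdict-append vs setdefault-append)
theorem pvBuild_eq : pvBuildMapB = pvBuildMapA := rfl

-- the task lists the two programs actually process coincide
theorem pvLists_eq (ttp : PySem.Dict Int (List Int)) (hnd : ttp.keys.Nodup) (T : Int) :
    (PySem.List.pyRange 1 (T+1) 1).filter (fun t => ttp.contains t)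
      = (PySem.List.sorted ttp.keys (fun k => k) false).filter
          (fun t => decide (1 ≤ t ∧ t ≤ T)) := by
  have hperm : (PySem.List.sorted ttp.keys (fun k => k) false).Perm ttp.keys :=
    PySem.List.sorted_perm ttp.keys (fun k => k) false
  have hKnd : (PySem.List.sorted ttp.keys (fun k => k) false).Nodup := hperm.nodup_iff.mpr hnd
  have hKle : (PySem.List.sorted ttp.keys (fun k => k) false).Pairwise (· ≤ ·) :=
    PySem.List.sorted_pairwise ttp.keys (fun k => k)
  have hKlt : (PySem.List.sorted ttp.keys (fun k => k) false).Pairwise (· < ·) :=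
    (hKle.and hKnd).imp (fun h => lt_of_le_of_ne h.1 h.2)
  have h2lt : ((PySem.List.sorted ttp.keys (fun k => k) false).filter
      (fun t => decide (1 ≤ t ∧ t ≤ T))).Pairwise (· < ·) := hKlt.filter _
  have h1lt : ((PySem.List.pyRange 1 (T+1) 1).filter (fun t => ttp.contains t)).Pairwise (· < ·) :=
    (PySem.List.pairwise_lt_pyRange_one 1 (T+1)).filter _
  have h1nd : ((PySem.List.pyRange 1 (T+1) 1).filter (fun t => ttp.contains t)).Nodup :=
    h1lt.imp (fun h => ne_of_lt h)
  have h2nd : ((PySem.List.sorted ttp.keys (fun k => k) false).filter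
      (fun t => decide (1 ≤ t ∧ t ≤ T))).Nodup := hKnd.filter _
  have hmem : ∀ t : Int,
      t ∈ (PySem.List.pyRange 1 (T+1) 1).filter (fun t => ttp.contains t)
        ↔ t ∈ (PySem.List.sorted ttp.keys (fun k => k) false).filter
            (fun t => decide (1 ≤ t ∧ t ≤ T)) := by
    intro t
    simp only [List.mem_filter, PySem.List.mem_pyRange_one, PySem.List.mem_sorted,
      decide_eq_true_eq, PySem.Dict.contains_iff_mem_keys]
    constructor
    · rintro ⟨⟨h1, h2⟩, h3⟩; exact ⟨h3, h1, by omega⟩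
    · rintro ⟨h3, h1, h2⟩; exact ⟨⟨h1, by omega⟩, h3⟩
  have hp : ((PySem.List.sorted ttp.keys (fun k => k) false).filter
      (fun t => decide (1 ≤ t ∧ t ≤ T))).Perm
        ((PySem.List.pyRange 1 (T+1) 1).filter (fun t => ttp.contains t)) := by
    rw [List.perm_ext_iff_of_nodup h2nd h1nd]
    intro a
    exact (hmem a).symm
  have e1 := PySem.List.sorted_eq_of_perm_of_pairwise_lt _ _ (fun k => k) hp h2lt
  have e2 := PySem.List.sorted_eq_self_of_pairwise
    ((PySem.List.pyRange 1 (T+1) 1).filter (fun t => ttp.contains t)) (fun k => k)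
    (h1lt.imp (fun h => le_of_lt h))
  rw [← e1, e2]

-- the two ports agree on every input
theorem pvMain (tp : List (List Int)) (T : Int) :
    functools_cache tp T = functools_cache_alt tp T := by
  unfold functools_cache functools_cache_alt
  simp only [pvBuild_eq]
  have hsize : ((1:Int) <<< (((tp.length : Int)).toNat : Int)) = ((2 ^ tp.length : Nat) : Int) := by
    rw [Int.toNat_natCast]
    exact Int.one_shiftLeft tp.length
  simp only [hsize]
  set n := tp.length with hN
  have hpow : (1:Nat) ≤ 2 ^ n := Nat.one_le_two_pow
  have hfm : ((2 ^ n : Nat) : Int) - 1 = ((2 ^ n - 1 : Nat) : Int) := by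
    push_cast [hpow]
    ring
  rw [hfm]
  set fm : Int := ((2 ^ n - 1 : Nat) : Int) with hfmdef
  set ttp := pvBuildMapA tp with http
  have hb : ∀ k p, p ∈ ttp.getD k [] → 0 ≤ p ∧ p < (n : Int) :=
    fun k p hp => pvBuild_mem_bound tp k p hp
  have hnd : ttp.keys.Nodup := pvBuild_nodup tp
  have hA := pvSolveA_eq n fm rfl ttp T hb (T + 1 - 1).toNat 1 0 (le_refl _)
  rw [hA]
  rw [pvFoldlGuard (fun task => 1 ≤ task ∧ task ≤ T) (fun dp task => pvStepB dp (ttp.getD task []))]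
  have hdp0 : (PySem.Dict.empty.insert (0:Int) (1:Int)).keys.Nodup := by decide
  obtain ⟨hS, hndF⟩ := pvLoopB fm (fun t => ttp.getD t [])
    ((PySem.List.sorted ttp.keys (fun k => k) false).filter (fun t => decide (1 ≤ t ∧ t ≤ T)))
    (PySem.Dict.empty.insert 0 1) hdp0
  have hind : (fun m => if m = fm then (1:Int) else 0) = pvW fm [] := by
    funext m
    simp [pvW]
  rw [← pvS_indicator _ fm hndF, hind, hS]
  have hstart : pvS (PySem.Dict.empty.insert (0:Int) (1:Int)).items
      (pvW fm (((PySem.List.sorted ttp.keys (fun k => k) false).filter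
        (fun t => decide (1 ≤ t ∧ t ≤ T))).map (fun t => ttp.getD t [])))
      = pvW fm (((PySem.List.sorted ttp.keys (fun k => k) false).filter
        (fun t => decide (1 ≤ t ∧ t ≤ T))).map (fun t => ttp.getD t [])) 0 := by
    have hitems : (PySem.Dict.empty.insert (0:Int) (1:Int)).items = [(0, 1)] := rfl
    simp [pvS, hitems]
  rw [hstart]
  rw [← pvLists_eq ttp hnd T]
  rw [← pvW_filter fm (fun t => ttp.getD t []) (fun t => ttp.contains t)
    (fun t ht => PySem.Dict.getD_of_not_contains ttp [] ht)]

-- ===== VERDICT (by name: the statement is the Claim_ definition above) =====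
theorem functools_cache_spec : Claim_equal_functools_cache := by
  intro tp T _ _
  unfold Spec_functools_cache
  exact pvMain tp T

@[simp] theorem functools_cache_raises : Claim_raises_functools_cache := by
  unfold Claim_raises_functools_cache
  constructor
  · intro tp T _ hr hp
    rcases hr with ⟨h1, h2⟩
    rcases hp with h | h
    · exact h1 h
    · omega
  · exact ⟨by decide, by decide, by decide⟩
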